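-- pv_equiv track=rewrite | github.com/HansDanielsson/Python-Intro | Tentamen/181102/Task7.py | sumpart
-- ===== SOURCE A (Python) =====
-- def sumpart(lst1, lst2):
--   if len(lst1) == 0:
--     return 0
--
--   tal = lst1[0]
--   resttal = lst1[1:]
--
--   result = sumpart(resttal, lst2)
--   if tal not in lst2:
--     result += tal
--   return result
-- ===== SOURCE B (Python) =====
-- def sumpart(lst1, lst2):
--   result = 0
--   for x in reversed(lst1):
--     if x not in lst2:
--       result += x
--   return result
-- ===== Notes on version B (the rewrite author's own statement) =====
-- stated objective: idiomatic
-- what changed: Replaced A's head/tail recursion by an iterative accumulator loop over reversed(lst1), which reproduces A's last-to-first summation order without recursion.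
import Mathlib
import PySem

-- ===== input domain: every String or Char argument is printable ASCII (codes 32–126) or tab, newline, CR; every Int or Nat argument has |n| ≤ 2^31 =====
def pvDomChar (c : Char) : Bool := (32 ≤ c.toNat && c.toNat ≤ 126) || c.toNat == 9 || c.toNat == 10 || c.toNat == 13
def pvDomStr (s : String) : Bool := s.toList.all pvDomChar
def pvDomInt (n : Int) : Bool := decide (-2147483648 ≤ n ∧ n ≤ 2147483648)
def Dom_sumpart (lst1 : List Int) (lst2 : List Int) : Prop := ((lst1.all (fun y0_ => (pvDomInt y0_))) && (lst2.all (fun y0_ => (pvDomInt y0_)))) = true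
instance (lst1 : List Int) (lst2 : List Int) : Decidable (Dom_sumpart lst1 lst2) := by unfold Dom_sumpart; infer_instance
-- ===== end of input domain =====

-- B replaces A's head/tail recursion by an iterative accumulator loop over reversed(lst1) (idiomatic).

-- ===== PORT A =====
def sumpart (lst1 : List Int) (lst2 : List Int) : Int :=
  match lst1 with
  | [] => 0
  | tal :: resttal =>
    let result := sumpart resttal lst2
    if ¬ (tal ∈ lst2) then result + tal else result

-- ===== PORT B =====
def sumpart_alt (lst1 : List Int) (lst2 : List Int) : Int :=
  lst1.reverse.foldl (fun result x => if ¬ (x ∈ lst2) then result + x else result) 0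

-- ===== PRECONDITION & SPEC =====
def Spec_sumpart (lst1 : List Int) (lst2 : List Int) (out : Int) : Prop := out = sumpart_alt lst1 lst2
instance (lst1 : List Int) (lst2 : List Int) (out : Int) : Decidable (Spec_sumpart lst1 lst2 out) := by unfold Spec_sumpart; infer_instance

-- ===== CLAIM (what is proved, stated in full; the proofs are below) =====
def Claim_equal_sumpart : Prop := ∀ (lst1 : List Int) (lst2 : List Int), Dom_sumpart lst1 lst2 → Spec_sumpart lst1 lst2 (sumpart lst1 lst2)

-- ===== LEMMAS AND PROOFS =====
theorem sumpart_eq_alt (lst1 lst2 : List Int) : sumpart lst1 lst2 = sumpart_alt lst1 lst2 := by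
  induction lst1 with
  | nil => simp [sumpart, sumpart_alt]
  | cons h t ih =>
    simp only [sumpart, sumpart_alt, List.reverse_cons, List.foldl_append, List.foldl_cons,
      List.foldl_nil] at *
    rw [ih]

-- ===== VERDICT (by name: the statement is the Claim_ definition above) =====
theorem sumpart_spec : Claim_equal_sumpart := by
  intro lst1 lst2 _
  exact sumpart_eq_alt lst1 lst2
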